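-- pv_equiv track=rewrite | github.com/X-Dexter/TVMPredictor | create_dataset/common.py | redress_dimensionality
-- ===== SOURCE A (Python) =====
-- def redress_dimensionality(dimensions):
--     '''
--     Correct the dimension with 0
--     '''
--     result = []
--     for dimension in dimensions:
--         if dimension==0 and len(result)>0:
--             return None                         # 屏蔽中间出现0的shape
--
--         if dimension>0:
--             result.append(dimension)
--
--     if len(result)<1:
--         return None
--     else:
--         return tuple(result)
-- ===== SOURCE B (Python) =====
-- def redress_dimensionality(dimensions):
--     dims = list(dimensions)
--     positives = [d for d in dims if d > 0]
--     if not positives: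
--         return None
--     idx = next(i for i, d in enumerate(dims) if d > 0)
--     if 0 in dims[idx:]:
--         return None
--     return tuple(positives)
-- ===== Notes on version B (the rewrite author's own statement) =====
-- stated objective: alternative
-- what changed: Replaced A's single interleaved append-and-abort scan with a two-pass filter-then-validate structure: collect positives in one pass, then independently check whether a 0 occurs at or after the first positive.
import Mathlib
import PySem

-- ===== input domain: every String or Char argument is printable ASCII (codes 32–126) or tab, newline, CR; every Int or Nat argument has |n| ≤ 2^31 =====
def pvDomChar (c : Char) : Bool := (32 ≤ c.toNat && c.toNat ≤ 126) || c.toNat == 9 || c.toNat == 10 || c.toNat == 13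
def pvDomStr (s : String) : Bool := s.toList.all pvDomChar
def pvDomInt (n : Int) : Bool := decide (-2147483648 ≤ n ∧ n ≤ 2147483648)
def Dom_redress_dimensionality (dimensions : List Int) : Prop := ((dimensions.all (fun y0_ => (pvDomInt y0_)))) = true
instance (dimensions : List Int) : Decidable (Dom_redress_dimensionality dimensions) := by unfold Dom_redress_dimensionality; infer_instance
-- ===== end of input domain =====

-- B replaces A's single interleaved append-and-abort scan with a two-pass filter-then-validate decomposition (alternative, same cost).


-- ===== PORT A =====
-- A's loop over `dimensions` carrying the accumulator `result`, aborting on a 0 after a positive.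
def redressLoopA : List Int → List Int → Option (List Int)
  | [], result => if result.length < 1 then none else some result
  | d :: rest, result =>
      if d = 0 ∧ result.length > 0 then none
      else redressLoopA rest (if 0 < d then result ++ [d] else result)

def redress_dimensionality (dimensions : List Int) : Option (List Int) :=
  redressLoopA dimensions []

-- ===== PORT B =====
def redress_dimensionality_alt (dimensions : List Int) : Option (List Int) :=
  let positives := dimensions.filter (fun d => 0 < d)
  if positives = [] then none
  else
    let idx := dimensions.findIdx (fun d => 0 < d)
    if (dimensions.drop idx).any (fun d => d == 0) then none
    else some positives

-- ===== PRECONDITION & SPEC =====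
def Spec_redress_dimensionality (dimensions : List Int) (out : Option (List Int)) : Prop := out = redress_dimensionality_alt dimensions
instance (dimensions : List Int) (out : Option (List Int)) : Decidable (Spec_redress_dimensionality dimensions out) := by unfold Spec_redress_dimensionality; infer_instance

-- ===== CLAIM (what is proved, stated in full; the proofs are below) =====
def Claim_equal_redress_dimensionality : Prop := ∀ (dimensions : List Int), Dom_redress_dimensionality dimensions → Spec_redress_dimensionality dimensions (redress_dimensionality dimensions)

-- ===== LEMMAS AND PROOFS =====

-- With a nonempty accumulator, A's loop aborts iff the remaining list contains a 0,
-- and otherwise appends the positives of the remainder.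
theorem redressLoopA_nonempty (l : List Int) (acc : List Int) (h : acc ≠ []) :
    redressLoopA l acc =
      if l.any (fun d => d == 0) then none
      else some (acc ++ l.filter (fun d => 0 < d)) := by
  induction l generalizing acc with
  | nil =>
      have : ¬ (List.length acc < 1) := by
        have := List.length_pos_iff.mpr h; omega
      simp [redressLoopA, this]
  | cons d rest ih =>
      by_cases hd : d = 0
      · subst hd
        simp [redressLoopA, List.length_pos_iff.mpr h]
      · have hacc' : (if 0 < d then acc ++ [d] else acc) ≠ [] := by
          split <;> simp [h]
        simp only [redressLoopA]
        rw [if_neg (by simp [hd])]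
        rw [ih _ hacc']
        by_cases hp : 0 < d
        · simp [hp, hd]
        · simp [hp, hd]

-- Characterisation of A's loop started from the empty accumulator as B's computation.
theorem redressLoopA_empty (l : List Int) :
    redressLoopA l [] = redress_dimensionality_alt l := by
  induction l with
  | nil => simp [redressLoopA, redress_dimensionality_alt]
  | cons d rest ih =>
      by_cases hp : 0 < d
      · have hd : d ≠ 0 := by omega
        simp only [redressLoopA]
        rw [if_neg (by simp)]
        rw [if_pos hp]
        simp only [List.nil_append]
        rw [redressLoopA_nonempty rest [d] (by simp)]
        simp [redress_dimensionality_alt, hp, List.findIdx_cons, hd]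
      · have hfilter : (d :: rest).filter (fun d => 0 < d) = rest.filter (fun d => 0 < d) := by
          simp [hp]
        have hidx : (d :: rest).findIdx (fun d => 0 < d) = (rest.findIdx (fun d => 0 < d)) + 1 := by
          simp [List.findIdx_cons, hp]
        simp only [redressLoopA]
        rw [if_neg (by simp)]
        rw [if_neg hp]
        rw [ih]
        simp [redress_dimensionality_alt, hfilter, hidx]

-- ===== VERDICT (by name: the statement is the Claim_ definition above) =====
theorem redress_dimensionality_spec : Claim_equal_redress_dimensionality := by
  intro dims _
  show redress_dimensionality dims = redress_dimensionality_alt dims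
  exact redressLoopA_empty dims
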